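-- pv_equiv track=rewrite | github.com/aigerimdev/pairs-with-given-sum | play.py | pairs_with_given_sum
-- ===== SOURCE A (Python) =====
-- def pairs_with_given_sum (numbers, target):
--     if numbers == []:
--         return 0
--     if not all (isinstance(num, int) for num in numbers):
--         raise ValueError ("You can enter only numbers!")
--     counter = 0
--     for i in range(len(numbers)):
--         for j in range(i+1, len(numbers)):
--             if numbers[i] + numbers[j] == target:
--                 counter += 1
--     return counter
-- ===== SOURCE B (Python) =====
-- def pairs_with_given_sum(numbers, target):
--     if not all(isinstance(num, int) for num in numbers):
--         raise ValueError("You can enter only numbers!")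
--     seen = {}
--     count = 0
--     for x in numbers:
--         count += seen.get(target - x, 0)
--         seen[x] = seen.get(x, 0) + 1
--     return count
-- ===== Notes on version B (the rewrite author's own statement) =====
-- stated objective: faster
-- what changed: Replaced the quadratic nested index loops by a single pass that keeps a hashmap of counts of values seen so far and, for each element x, adds the number of earlier elements equal to target-x.
import Mathlib
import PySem

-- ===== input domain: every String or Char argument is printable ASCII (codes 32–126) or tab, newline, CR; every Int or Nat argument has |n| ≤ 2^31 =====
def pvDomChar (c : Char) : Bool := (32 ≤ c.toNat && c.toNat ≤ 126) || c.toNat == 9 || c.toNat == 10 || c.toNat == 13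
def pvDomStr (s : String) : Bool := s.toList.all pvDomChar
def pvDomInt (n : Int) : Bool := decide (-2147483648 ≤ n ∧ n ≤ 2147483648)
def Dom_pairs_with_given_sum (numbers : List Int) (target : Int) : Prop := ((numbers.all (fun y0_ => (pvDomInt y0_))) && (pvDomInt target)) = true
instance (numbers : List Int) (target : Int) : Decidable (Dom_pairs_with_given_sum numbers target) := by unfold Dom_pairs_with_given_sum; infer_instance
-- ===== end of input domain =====

-- B replaces A's O(n^2) nested index loops by one pass with a dict of counts of
-- values seen so far (asymptotically faster). A's isinstance check never fires on
-- List Int inputs and is omitted in both ports.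

-- ===== PORT A =====
-- literal port of A: empty-list early return, then nested loops over index ranges
-- (indices are always in range, so numbers[i] is ported as pyGetD, exact here)
def pairs_with_given_sum (numbers : List Int) (target : Int) : Int :=
  if numbers = [] then 0
  else
    (PySem.List.pyRange 0 (numbers.length : Int) 1).foldl (fun counter i =>
      (PySem.List.pyRange (i + 1) (numbers.length : Int) 1).foldl (fun c j =>
        if PySem.List.pyGetD numbers i 0 + PySem.List.pyGetD numbers j 0 = target
        then c + 1 else c) counter) 0

-- ===== PORT B =====
-- literal port of Source B: one fold carrying (count, seen); seen.get(k, 0) is getD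
def pairs_with_given_sum_alt (numbers : List Int) (target : Int) : Int :=
  (numbers.foldl
    (fun (s : Int × PySem.Dict Int Int) x =>
      (s.1 + s.2.getD (target - x) 0, s.2.insert x (s.2.getD x 0 + 1)))
    (0, PySem.Dict.empty)).1

-- ===== PRECONDITION & SPEC =====
def Spec_pairs_with_given_sum (numbers : List Int) (target : Int) (out : Int) : Prop := out = pairs_with_given_sum_alt numbers target
instance (numbers : List Int) (target : Int) (out : Int) : Decidable (Spec_pairs_with_given_sum numbers target out) := by unfold Spec_pairs_with_given_sum; infer_instance

-- ===== CLAIM (what is proved, stated in full; the proofs are below) =====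
def Claim_equal_pairs_with_given_sum : Prop := ∀ (numbers : List Int) (target : Int), Dom_pairs_with_given_sum numbers target → Spec_pairs_with_given_sum numbers target (pairs_with_given_sum numbers target)

-- ===== LEMMAS AND PROOFS =====

-- common reference value: pairs counted head-first
def cp (t : Int) : List Int → Int
  | [] => 0
  | x :: rest => ((rest.count (t - x) : Nat) : Int) + cp t rest

-- index shift: a predicate on values read from (x :: rest) at indices a+1 … n
-- equals the same predicate on rest at indices a … n-1
lemma countP_shift (x : Int) (rest : List Int) (a : Nat) (q : Int → Bool) :
    (PySem.List.pyRange ((a : Int) + 1) ((rest.length + 1 : Nat) : Int) 1).countP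
        (fun j => q (PySem.List.pyGetD (x :: rest) j 0))
    = (PySem.List.pyRange (a : Int) (rest.length : Int) 1).countP
        (fun j => q (PySem.List.pyGetD rest j 0)) := by
  rw [PySem.List.pyRange_one, PySem.List.pyRange_one, List.countP_map, List.countP_map]
  have hlen : (((rest.length + 1 : Nat) : Int) - ((a : Int) + 1)).toNat
      = (((rest.length : Nat) : Int) - (a : Int)).toNat := by omega
  rw [hlen]
  apply List.countP_congr
  intro k _
  have h1 : (a : Int) + 1 + (k : Int) = ((a + k + 1 : Nat) : Int) := by push_cast; ring
  have h2 : (a : Int) + (k : Int) = ((a + k : Nat) : Int) := by push_cast; ring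
  simp only [Function.comp, h1, h2, PySem.List.pyGetD_natCast]
  simp [List.getD]

-- counting over all indices of a list is counting over the list
lemma countP_get (rest : List Int) (q : Int → Bool) :
    (PySem.List.pyRange 0 (rest.length : Int) 1).countP
        (fun j => q (PySem.List.pyGetD rest j 0))
    = rest.countP q := by
  conv_rhs => rw [← PySem.List.map_pyGetD_pyRange_zero rest 0]
  rw [List.countP_map]
  rfl

-- the inner-count function of A's outer loop
def fA (t : Int) (xs : List Int) (i : Int) : Int :=
  (((PySem.List.pyRange (i + 1) (xs.length : Int) 1).countP
      (fun j => decide (PySem.List.pyGetD xs i 0 + PySem.List.pyGetD xs j 0 = t)) : Nat) : Int)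

lemma A_core_eq_sum (xs : List Int) (t : Int) :
    (PySem.List.pyRange 0 (xs.length : Int) 1).foldl (fun counter i =>
      (PySem.List.pyRange (i + 1) (xs.length : Int) 1).foldl (fun c j =>
        if PySem.List.pyGetD xs i 0 + PySem.List.pyGetD xs j 0 = t
        then c + 1 else c) counter) 0
    = (((PySem.List.pyRange 0 (xs.length : Int) 1).map (fA t xs)).sum) := by
  rw [PySem.List.foldl_congr_mem _ _ (fun counter i => counter + fA t xs i) 0]
  · rw [PySem.List.foldl_add]; ring
  · intro acc i _
    exact PySem.List.foldl_ite_add_one _ _ acc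

lemma sum_fA_cons (t x : Int) (rest : List Int) :
    ((PySem.List.pyRange 0 (((x :: rest).length : Nat) : Int) 1).map (fA t (x :: rest))).sum
    = ((rest.count (t - x) : Nat) : Int)
      + ((PySem.List.pyRange 0 (rest.length : Int) 1).map (fA t rest)).sum := by
  have hcons : PySem.List.pyRange 0 (((x :: rest).length : Nat) : Int) 1
      = 0 :: PySem.List.pyRange 1 (((x :: rest).length : Nat) : Int) 1 := by
    exact PySem.List.pyRange_one_cons (by simp)
  rw [hcons, List.map_cons, List.sum_cons]
  congr 1
  · -- head term: pairs of x with later elements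
    show fA t (x :: rest) 0 = _
    unfold fA
    have hx0 : PySem.List.pyGetD (x :: rest) 0 0 = x := by
      exact PySem.List.pyGetD_natCast (x :: rest) 0 0
    rw [hx0]
    rw [show (0 : Int) + 1 = ((0 : Nat) : Int) + 1 by norm_num]
    rw [show (((x :: rest).length : Nat) : Int) = ((rest.length + 1 : Nat) : Int) by simp]
    rw [countP_shift x rest 0 (fun v => decide (x + v = t))]
    rw [show ((0 : Nat) : Int) = (0 : Int) from rfl]
    rw [countP_get rest (fun v => decide (x + v = t))]
    congr 1
    rw [List.count_eq_countP]
    apply List.countP_congr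
    intro y _
    simp only [decide_eq_true_eq, beq_iff_eq]
    omega
  · -- tail: each outer index shifts down by one
    rw [PySem.List.pyRange_one, PySem.List.pyRange_one, List.map_map, List.map_map]
    have hlen : ((((x :: rest).length : Nat) : Int) - 1).toNat
        = (((rest.length : Nat) : Int) - 0).toNat := by simp
    rw [hlen]
    refine congrArg List.sum ?_
    apply List.map_congr_left
    intro k _
    simp only [Function.comp]
    unfold fA
    have h1 : (1 : Int) + (k : Int) = ((k + 1 : Nat) : Int) := by push_cast; ring
    have h2 : (0 : Int) + (k : Int) = ((k : Nat) : Int) := by ring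
    rw [h1, h2]
    congr 1
    rw [show ((k + 1 : Nat) : Int) + 1 = ((k + 1 : Nat) : Int) + 1 from rfl]
    rw [show (((x :: rest).length : Nat) : Int) = ((rest.length + 1 : Nat) : Int) by simp]
    rw [countP_shift x rest (k + 1)
      (fun v => decide (PySem.List.pyGetD (x :: rest) ((k + 1 : Nat) : Int) 0 + v = t))]
    rw [show ((k + 1 : Nat) : Int) = ((k : Nat) : Int) + 1 by push_cast; ring]
    apply List.countP_congr
    intro j _
    have hg : PySem.List.pyGetD (x :: rest) (((k : Nat) : Int) + 1) 0
        = PySem.List.pyGetD rest ((k : Nat) : Int) 0 := by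
      rw [show ((k : Nat) : Int) + 1 = ((k + 1 : Nat) : Int) by push_cast; ring,
        PySem.List.pyGetD_natCast, PySem.List.pyGetD_natCast]
      simp [List.getD]
    rw [hg]

lemma A_eq_cp (xs : List Int) (t : Int) : pairs_with_given_sum xs t = cp t xs := by
  unfold pairs_with_given_sum
  split_ifs with h
  · simp [h, cp]
  · rw [A_core_eq_sum]
    clear h
    induction xs with
    | nil => simp [cp, PySem.List.pyRange]
    | cons x rest ih => rw [sum_fA_cons, ih, cp]

lemma B_gen (t : Int) (xs : List Int) (c : Int) (d : PySem.Dict Int Int) (seen : List Int)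
    (hd : ∀ v, d.getD v 0 = ((seen.count v : Nat) : Int)) :
    (xs.foldl
      (fun (s : Int × PySem.Dict Int Int) x =>
        (s.1 + s.2.getD (t - x) 0, s.2.insert x (s.2.getD x 0 + 1)))
      (c, d)).1
    = c + (xs.map (fun y => ((seen.count (t - y) : Nat) : Int))).sum + cp t xs := by
  induction xs generalizing c d seen with
  | nil => simp [cp]
  | cons x rest ih =>
    rw [List.foldl_cons]
    rw [ih (c + d.getD (t - x) 0) _ (x :: seen)
      (by
        intro v
        rw [PySem.Dict.getD_insert]
        by_cases hv : v = x
        · subst hv; rw [if_pos rfl, hd]; simp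
        · rw [if_neg hv, hd]
          have : (x == v) = false := by simp [Ne.symm hv]
          simp [List.count_cons, this])]
    rw [hd, cp]
    have hsplit : (rest.map (fun y => (((x :: seen).count (t - y) : Nat) : Int))).sum
        = (rest.map (fun y => ((seen.count (t - y) : Nat) : Int))).sum
          + ((rest.count (t - x) : Nat) : Int) := by
      have hpt : rest.map (fun y => (((x :: seen).count (t - y) : Nat) : Int))
          = rest.map (fun y => ((seen.count (t - y) : Nat) : Int)
              + (if (fun y => decide (y = t - x)) y = true then 1 else 0)) := by
        apply List.map_congr_left
        intro y _
        by_cases hx : y = t - x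
        · simp [hx]
        · have hf : (x == t - y) = false := by simp; omega
          simp [List.count_cons, hf, hx]
      rw [hpt, PySem.List.sum_map_add_int, PySem.List.sum_map_ite_one_zero]
      congr 1
    rw [hsplit, List.map_cons, List.sum_cons]
    ring

lemma B_eq_cp (xs : List Int) (t : Int) : pairs_with_given_sum_alt xs t = cp t xs := by
  unfold pairs_with_given_sum_alt
  rw [B_gen t xs 0 PySem.Dict.empty []
    (by intro v; simp [PySem.Dict.getD_empty])]
  simp

-- ===== VERDICT (by name: the statement is the Claim_ definition above) =====
theorem pairs_with_given_sum_spec : Claim_equal_pairs_with_given_sum := by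
  intro numbers target _
  unfold Spec_pairs_with_given_sum
  rw [A_eq_cp, B_eq_cp]
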